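-- pv_equiv track=rewrite | github.com/HeastN/AdventOfCode2023 | day3/main03.py | find_numbers_in_line
-- ===== SOURCE A (Python) =====
-- def find_numbers_in_line(line):
--     # Return a list of numbers in a line as strings and their corresponding starting index
--     numbers = []
--     i = 0
--     while i < len(line):
--         if line[i].isdigit():
--             # Number starts at index i and check how long it is
--             j = i
--             whole_number = ''
--             while j < len(line) and line[j].isdigit():
--                 whole_number += line[j]
--                 j += 1
--             numbers.append([whole_number, i])
--             i = j  # Skip over the number we just processed
--         else:
--             i += 1
--     return numbers
-- ===== SOURCE B (Python) =====
-- from itertools import groupby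
--
-- def find_numbers_in_line(line):
--     # groupby-based: group consecutive chars by digit-ness, track running index
--     numbers = []
--     idx = 0
--     for is_digit, group in groupby(line, key=str.isdigit):
--         chars = list(group)
--         if is_digit:
--             numbers.append([''.join(chars), idx])
--         idx += len(chars)
--     return numbers
-- ===== Notes on version B (the rewrite author's own statement) =====
-- stated objective: idiomatic
-- what changed: Replaces the hand-rolled index-based while loop with a nested digit-scan by a single itertools.groupby pass over the characters keyed on str.isdigit, emitting each digit group with a running start index.
import Mathlib
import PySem

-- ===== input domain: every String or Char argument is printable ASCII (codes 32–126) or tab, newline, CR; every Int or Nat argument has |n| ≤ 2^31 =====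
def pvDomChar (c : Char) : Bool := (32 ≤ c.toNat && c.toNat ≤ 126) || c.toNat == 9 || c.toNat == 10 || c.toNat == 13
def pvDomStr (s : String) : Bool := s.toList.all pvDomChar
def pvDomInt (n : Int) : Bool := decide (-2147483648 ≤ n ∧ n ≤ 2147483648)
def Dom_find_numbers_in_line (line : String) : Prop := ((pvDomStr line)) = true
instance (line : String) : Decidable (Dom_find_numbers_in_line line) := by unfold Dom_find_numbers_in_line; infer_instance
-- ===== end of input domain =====

-- B re-implements A's index-based while loop as a single groupby pass over digit-ness runs (idiomatic decomposition); same return values proved.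

-- ===== PORT A =====
-- inner while loop of A: append digits starting at index j to whole_number
def pvInnerA (cs : List Char) (j : Nat) (acc : String) : String × Nat :=
  if h : j < cs.length then
    if (cs[j]).isDigit then pvInnerA cs (j + 1) (acc.push cs[j]) else (acc, j)
  else (acc, j)
termination_by cs.length - j
decreasing_by exact Nat.sub_succ_lt_self cs.length j h

-- needed by pvLoopA's decreasing_by: the inner loop never moves j backwards
theorem pvInnerA_le (cs : List Char) (j : Nat) (acc : String) : j ≤ (pvInnerA cs j acc).2 := by
  fun_induction pvInnerA cs j acc with
  | case1 j acc h hd ih => omega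
  | case2 j acc h hd => simp
  | case3 j acc h => simp

-- needed by pvLoopA's decreasing_by: after processing a number the index strictly advances
theorem pvLoopA_dec (cs : List Char) (i : Nat) (h : i < cs.length) (hd : (cs[i]).isDigit) :
    cs.length - (pvInnerA cs i "").2 < cs.length - i := by
  have h1 : i + 1 ≤ (pvInnerA cs (i + 1) (("" : String).push cs[i])).2 := pvInnerA_le ..
  have h2 : pvInnerA cs i "" = pvInnerA cs (i + 1) (("" : String).push cs[i]) := by
    rw [pvInnerA]; simp [h, hd]
  rw [h2]; omega

-- outer while loop of A over index i
def pvLoopA (cs : List Char) (i : Nat) : List (String × Int) :=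
  if h : i < cs.length then
    if hd : (cs[i]).isDigit then
      let wj := pvInnerA cs i ""
      (wj.1, (i : Int)) :: pvLoopA cs wj.2
    else pvLoopA cs (i + 1)
  else []
termination_by cs.length - i
decreasing_by
  · exact pvLoopA_dec cs i h hd
  · exact Nat.sub_succ_lt_self cs.length i h

def find_numbers_in_line (line : String) : List (String × Int) := pvLoopA line.toList 0

-- ===== PORT B =====
-- groupby(line, key=str.isdigit): each step takes the maximal run sharing the head's digit-ness
def pvLoopB (cs : List Char) (idx : Nat) : List (String × Int) :=
  match cs with
  | [] => []
  | c :: rest =>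
    let k := c.isDigit
    let grp := c :: rest.takeWhile (fun d => d.isDigit == k)
    let rest' := rest.dropWhile (fun d => d.isDigit == k)
    (if k then [(String.ofList grp, (idx : Int))] else []) ++ pvLoopB rest' (idx + grp.length)
termination_by cs.length
decreasing_by
  exact Nat.lt_succ_of_le (List.length_dropWhile_le _ rest)

def find_numbers_in_line_alt (line : String) : List (String × Int) := pvLoopB line.toList 0

-- ===== PRECONDITION & SPEC =====
def Spec_find_numbers_in_line (line : String) (out : List (String × Int)) : Prop := out = find_numbers_in_line_alt line
instance (line : String) (out : List (String × Int)) : Decidable (Spec_find_numbers_in_line line out) := by unfold Spec_find_numbers_in_line; infer_instance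

-- ===== CLAIM (what is proved, stated in full; the proofs are below) =====
def Claim_equal_find_numbers_in_line : Prop := ∀ (line : String), Dom_find_numbers_in_line line → Spec_find_numbers_in_line line (find_numbers_in_line line)

-- ===== LEMMAS AND PROOFS =====

theorem pvLoopB_nil (idx : Nat) : pvLoopB [] idx = [] := by rw [pvLoopB]

theorem pvLoopB_cons (c : Char) (rest : List Char) (idx : Nat) :
    pvLoopB (c :: rest) idx =
      (if c.isDigit then
        [(String.ofList (c :: rest.takeWhile (fun d => d.isDigit == c.isDigit)), (idx : Int))]
       else []) ++
      pvLoopB (rest.dropWhile (fun d => d.isDigit == c.isDigit))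
        (idx + (c :: rest.takeWhile (fun d => d.isDigit == c.isDigit)).length) := by
  rw [pvLoopB]

-- A's inner loop collects exactly the maximal digit run of cs.drop j
theorem pvInnerA_spec (cs : List Char) (j : Nat) (acc : String) :
    pvInnerA cs j acc =
      (String.ofList (acc.toList ++ (cs.drop j).takeWhile Char.isDigit),
       j + ((cs.drop j).takeWhile Char.isDigit).length) := by
  fun_induction pvInnerA cs j acc with
  | case1 j acc h hd ih =>
    have hdrop : cs.drop j = cs[j] :: cs.drop (j + 1) := List.drop_eq_getElem_cons h
    rw [ih, hdrop]
    simp only [List.takeWhile_cons, hd, if_pos, String.toList_push, Prod.mk.injEq, List.length_cons]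
    refine ⟨by simp, by omega⟩
  | case2 j acc h hd =>
    have hdrop : cs.drop j = cs[j] :: cs.drop (j + 1) := List.drop_eq_getElem_cons h
    have h0 : List.takeWhile Char.isDigit (cs.drop j) = [] := by rw [hdrop]; simp [hd]
    simp [h0]
  | case3 j acc h =>
    have h0 : cs.drop j = [] := List.drop_eq_nil_of_le (by omega)
    simp [h0]

-- B absorbs a non-digit head one character at a time
theorem pvLoopB_skip (c : Char) (rest : List Char) (idx : Nat) (hc : c.isDigit = false) :
    pvLoopB (c :: rest) idx = pvLoopB rest (idx + 1) := by
  cases rest with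
  | nil => simp [pvLoopB_cons, pvLoopB_nil, hc]
  | cons d t =>
    by_cases hd : d.isDigit
    · simp [pvLoopB_cons, hc, hd]
    · rw [pvLoopB_cons, pvLoopB_cons]
      simp only [hc, List.takeWhile_cons, List.dropWhile_cons]
      simp [hd]
      congr 1
      omega

-- main invariant: A's loop from index i equals B's loop on the suffix cs.drop i
theorem pvLoop_eq (cs : List Char) (i : Nat) : pvLoopA cs i = pvLoopB (cs.drop i) i := by
  fun_induction pvLoopA cs i with
  | case1 i h hd wj ih =>
    have hspec := pvInnerA_spec cs i ""
    have hdrop : cs.drop i = cs[i] :: cs.drop (i + 1) := List.drop_eq_getElem_cons h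
    set tw := (cs.drop i).takeWhile Char.isDigit with htw
    have htw' : tw = cs[i] :: (cs.drop (i + 1)).takeWhile Char.isDigit := by
      rw [htw, hdrop, List.takeWhile_cons, if_pos hd]
    have hwj : wj = (String.ofList tw, i + tw.length) := by
      simp [wj, hspec, htw]
    have hpred : (fun d : Char => d.isDigit == cs[i].isDigit) = fun d : Char => d.isDigit := by
      funext d; simp [hd]
    have hrest' : (cs.drop (i + 1)).dropWhile Char.isDigit = cs.drop (i + tw.length) := by
      have hsplit : tw ++ (cs.drop i).dropWhile Char.isDigit = cs.drop i :=
        List.takeWhile_append_dropWhile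
      have hdw : (cs.drop i).dropWhile Char.isDigit = (cs.drop i).drop tw.length := by
        conv_rhs => rw [← hsplit]
        simp
      rw [hdrop, List.dropWhile_cons, if_pos (by simp [hd])] at hdw
      rw [hdw, htw']
      simp only [List.length_cons, List.drop_succ_cons, List.drop_drop]
      congr 1
      omega
    conv_rhs => rw [hdrop, pvLoopB_cons]
    simp only [hpred]
    rw [hrest', ← htw']
    rw [hwj] at ih ⊢
    simp only at ih
    rw [ih]
    simp [hd, htw']
  | case2 i h hd ih =>
    have hdrop : cs.drop i = cs[i] :: cs.drop (i + 1) := List.drop_eq_getElem_cons h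
    rw [ih, hdrop, pvLoopB_skip _ _ _ (by simpa using hd)]
  | case3 i h =>
    have h0 : cs.drop i = [] := List.drop_eq_nil_of_le (by omega)
    simp [h0, pvLoopB_nil]

-- ===== VERDICT (by name: the statement is the Claim_ definition above) =====
theorem find_numbers_in_line_spec : Claim_equal_find_numbers_in_line := by
  intro line _
  unfold Spec_find_numbers_in_line find_numbers_in_line find_numbers_in_line_alt
  simpa using pvLoop_eq line.toList 0
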